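-- pv_equiv track=rewrite | github.com/daniel-reich/ubiquitous-fiesta | hzs9hZXpgYdGM3iwB_1.py | alternating_caps
-- ===== SOURCE A (Python) =====
-- def alternating_caps(txt):
--   b,c='',0
--   for i in txt:
--       if i==' ':
--         b+=' '
--         continue
--       elif c%2==0:
--         b+=i.upper()
--         c+=1
--       else:
--         b+=i.lower()
--         c+=1
--   return b
-- ===== SOURCE B (Python) =====
-- def alternating_caps(txt):
--     nonspace = [ch for ch in txt if ch != ' ']
--     cased = [ch.upper() if i % 2 == 0 else ch.lower()
--              for i, ch in enumerate(nonspace)]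
--     it = iter(cased)
--     return ''.join(' ' if ch == ' ' else next(it) for ch in txt)
-- ===== Notes on version B (the rewrite author's own statement) =====
-- stated objective: alternative
-- what changed: Replaces A's single coupled loop with a manual parity counter and string accumulation by a two-phase pipeline: extract non-space chars, case them by their index parity via enumerate, then merge them back over the original text with an iterator and join.
import Mathlib
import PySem

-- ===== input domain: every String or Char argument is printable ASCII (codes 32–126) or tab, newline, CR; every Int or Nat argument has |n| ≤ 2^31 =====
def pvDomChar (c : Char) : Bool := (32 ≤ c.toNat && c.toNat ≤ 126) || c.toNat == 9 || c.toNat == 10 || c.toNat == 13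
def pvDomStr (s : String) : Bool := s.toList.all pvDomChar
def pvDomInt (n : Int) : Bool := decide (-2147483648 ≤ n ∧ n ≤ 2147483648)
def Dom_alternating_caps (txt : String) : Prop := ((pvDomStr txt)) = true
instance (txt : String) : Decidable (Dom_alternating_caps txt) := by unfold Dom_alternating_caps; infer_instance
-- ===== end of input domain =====

-- B replaces A's single loop with a parity counter by a filter/enumerate/merge pipeline (alternative decomposition).

-- ===== PORT A =====
-- A's loop: accumulator b, non-space counter c.
def altLoopA : List Char → List Char → Int → List Char
  | [], b, _ => b
  | i :: rest, b, c =>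
    if i = ' ' then altLoopA rest (b ++ [' ']) c
    else if PySem.Int.mod c 2 = 0 then altLoopA rest (b ++ [PySem.Chars.upperChar i]) (c + 1)
    else altLoopA rest (b ++ [PySem.Chars.lowerChar i]) (c + 1)

def alternating_caps (txt : String) : String :=
  String.ofList (altLoopA txt.toList [] 0)

-- ===== PORT B =====
-- Source B's final generator: ' ' for a space, else the next cased char from the queue.
def mergeCased : List Char → List Char → List Char
  | [], _ => []
  | ch :: rest, q =>
    if ch = ' ' then ' ' :: mergeCased rest q
    else match q with
      | [] => []          -- next() on an exhausted iterator; unreachable by construction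
      | d :: qs => d :: mergeCased rest qs

def alternating_caps_alt (txt : String) : String :=
  let nonspace := txt.toList.filter (fun ch => ch ≠ ' ')
  let cased := (PySem.List.enumerate nonspace 0).map
    (fun p => if PySem.Int.mod p.1 2 = 0 then PySem.Chars.upperChar p.2 else PySem.Chars.lowerChar p.2)
  String.ofList (mergeCased txt.toList cased)

-- ===== PRECONDITION & SPEC =====
def Spec_alternating_caps (txt : String) (out : String) : Prop := out = alternating_caps_alt txt
instance (txt : String) (out : String) : Decidable (Spec_alternating_caps txt out) := by unfold Spec_alternating_caps; infer_instance

-- ===== CLAIM (what is proved, stated in full; the proofs are below) =====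
def Claim_equal_alternating_caps : Prop := ∀ (txt : String), Dom_alternating_caps txt → Spec_alternating_caps txt (alternating_caps txt)

-- ===== LEMMAS AND PROOFS =====

-- alternating casing of a list, starting at counter value c (A's view of B's `cased`)
def altCase (c : Int) : List Char → List Char
  | [] => []
  | x :: xs =>
    (if PySem.Int.mod c 2 = 0 then PySem.Chars.upperChar x else PySem.Chars.lowerChar x) :: altCase (c + 1) xs

lemma altCase_eq_map_enumerate (xs : List Char) (c : Int) :
    altCase c xs = (PySem.List.enumerate xs c).map
      (fun p => if PySem.Int.mod p.1 2 = 0 then PySem.Chars.upperChar p.2 else PySem.Chars.lowerChar p.2) := by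
  induction xs generalizing c with
  | nil => simp [altCase, PySem.List.enumerate_nil]
  | cons x xs ih => simp [altCase, PySem.List.enumerate_cons, ih]

lemma altLoopA_eq (l : List Char) : ∀ (b : List Char) (c : Int),
    altLoopA l b c = b ++ mergeCased l (altCase c (l.filter (fun ch => ch ≠ ' '))) := by
  induction l with
  | nil => intro b c; simp [altLoopA, mergeCased]
  | cons x rest ih =>
    intro b c
    by_cases hx : x = ' '
    · simp [altLoopA, hx, mergeCased, ih]
    · by_cases hc : (2 : Int) ∣ c <;>
        simp [altLoopA, hx, hc, mergeCased, altCase, ih]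

-- ===== VERDICT (by name: the statement is the Claim_ definition above) =====
theorem alternating_caps_spec : Claim_equal_alternating_caps := by
  intro txt _
  unfold Spec_alternating_caps alternating_caps alternating_caps_alt
  rw [altLoopA_eq, altCase_eq_map_enumerate]
  simp
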